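-- pv_equiv track=rewrite | github.com/yuanv4/AiBookkeeping | app/extractors/bank_standard.py | _extract_account_info
-- ===== SOURCE A (Python) =====
-- from typing import List, Dict, Any
--
-- def _extract_account_info(rows: List[tuple], config: Dict):
--     name = None
--     number = None
--     for i in range(min(10, len(rows))):
--         row = rows[i]
--         for val in row:
--             val_str = str(val) if val is not None else ""
--             if config['account_name_key'] in val_str:
--                 try: name = val_str.split(config['account_name_key'])[1].strip()
--                 except: pass
--             if config['account_number_key'] in val_str:
--                 try: number = val_str.split(config['account_number_key'])[1].strip()
--                 except: pass
--     return name, number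
-- ===== SOURCE B (Python) =====
-- def _extract_account_info(rows, config):
--     name = None
--     number = None
--     for row in reversed(rows[:10]):
--         for val in reversed(row):
--             val_str = str(val) if val is not None else ""
--             if name is None:
--                 key = config['account_name_key']
--                 if key and key in val_str:
--                     name = val_str.split(key)[1].strip()
--             if number is None:
--                 key = config['account_number_key']
--                 if key and key in val_str:
--                     number = val_str.split(key)[1].strip()
--         if name is not None and number is not None:
--             break
--     return name, number
-- ===== Notes on version B (the rewrite author's own statement) =====
-- stated objective: alternative
-- what changed: A sweeps the first ten rows forward, re-splitting and overwriting name/number on every match so the last match wins; B scans the rows and in-row values backward, fills each slot only while it is still empty, and breaks out of the loop as soon as both are found.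
import Mathlib
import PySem

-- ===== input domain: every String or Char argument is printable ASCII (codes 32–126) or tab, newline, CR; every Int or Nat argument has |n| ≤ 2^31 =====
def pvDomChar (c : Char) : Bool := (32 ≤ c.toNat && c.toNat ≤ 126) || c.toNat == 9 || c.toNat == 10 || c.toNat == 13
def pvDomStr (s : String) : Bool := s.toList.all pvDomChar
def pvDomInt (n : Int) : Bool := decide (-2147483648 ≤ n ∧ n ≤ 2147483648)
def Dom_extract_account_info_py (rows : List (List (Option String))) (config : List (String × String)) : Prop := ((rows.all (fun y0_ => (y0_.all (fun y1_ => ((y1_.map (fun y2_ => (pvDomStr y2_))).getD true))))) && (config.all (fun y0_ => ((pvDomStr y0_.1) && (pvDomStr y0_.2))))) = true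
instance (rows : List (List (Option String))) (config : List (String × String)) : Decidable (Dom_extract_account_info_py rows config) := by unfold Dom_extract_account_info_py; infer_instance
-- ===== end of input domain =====

-- B replaces A's overwrite-everything forward sweep by a backward scan (rows and
-- in-row values reversed) that fills each slot only while it is still None and
-- stops as soon as both are found; objective: alternative (early-exit) traversal.

-- ===== PORT A =====
-- config['k'] looked up on the assoc list (first match); the .getD "" is a total
-- guard: Pre_ excludes the inputs on which Python raises KeyError here.
def pvKeyLookup (config : List (String × String)) (k : String) : String :=
  ((PySem.Dict.mk config).get? k).getD ""

def extract_account_info_py (rows : List (List (Option String))) (config : List (String × String)) : Option String × Option String :=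
  (PySem.List.pyRange 0 (min 10 (rows.length : Int)) 1).foldl
    (fun st i =>
      let row := PySem.List.pyGetD rows i []
      row.foldl
        (fun st val =>
          let val_str := val.getD ""
          let nk := pvKeyLookup config "account_name_key"
          let name :=
            if PySem.Str.isIn nk val_str then
              -- try: name = val_str.split(nk)[1].strip()  except: pass
              match PySem.Str.split? val_str nk with
              | some parts =>
                match PySem.List.pyGet? parts 1 with
                | some p => some (PySem.Str.strip p)
                | none => st.1
              | none => st.1
            else st.1
          let bk := pvKeyLookup config "account_number_key"
          let number :=
            if PySem.Str.isIn bk val_str then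
              match PySem.Str.split? val_str bk with
              | some parts =>
                match PySem.List.pyGet? parts 1 with
                | some p => some (PySem.Str.strip p)
                | none => st.2
              | none => st.2
            else st.2
          (name, number))
        st)
    (none, none)

-- ===== PORT B =====
-- val_str.split(key)[1].strip(); called only under the guard 'key nonempty and
-- key in val_str', where Python's split cannot raise; cur is the unreachable default.
def pvGrab (key val_str : String) (cur : Option String) : Option String :=
  match PySem.List.pyGet? ((PySem.Str.split? val_str key).getD []) 1 with
  | some p => some (PySem.Str.strip p)
  | none => cur

-- inner loop: for val in reversed(row) (caller passes the reversed row); each key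
-- is looked up only while its slot is still None, exactly as Source B does
def pvScanVals (config : List (String × String)) (st : Option String × Option String) :
    List (Option String) → Option String × Option String
  | [] => st
  | val :: rest =>
    let val_str := val.getD ""
    let name :=
      if st.1 = none then
        let key := pvKeyLookup config "account_name_key"
        if key ≠ "" ∧ PySem.Str.isIn key val_str = true then pvGrab key val_str st.1 else st.1
      else st.1
    let number :=
      if st.2 = none then
        let key := pvKeyLookup config "account_number_key"
        if key ≠ "" ∧ PySem.Str.isIn key val_str = true then pvGrab key val_str st.2 else st.2
      else st.2
    pvScanVals config (name, number) rest

-- outer loop: for row in reversed(rows[:10]), break once both slots are filled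
def pvScanRows (config : List (String × String)) (st : Option String × Option String) :
    List (List (Option String)) → Option String × Option String
  | [] => st
  | row :: rest =>
    let st' := pvScanVals config st row.reverse
    if st'.1.isSome ∧ st'.2.isSome then st' else pvScanRows config st' rest

def extract_account_info_py_alt (rows : List (List (Option String))) (config : List (String × String)) : Option String × Option String :=
  pvScanRows config (none, none) (PySem.List.slice rows none (some 10)).reverse

-- ===== PRECONDITION & SPEC =====
-- Pre_ excludes exactly the inputs on which A raises KeyError: some value occurs in
-- the first 10 rows (so config['…'] is evaluated) while a key is missing from config.
def Pre_extract_account_info_py (rows : List (List (Option String))) (config : List (String × String)) : Prop :=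
  ((PySem.Dict.mk config).contains "account_name_key" = true ∧
   (PySem.Dict.mk config).contains "account_number_key" = true) ∨
  (rows.take 10).all List.isEmpty = true
instance (rows : List (List (Option String))) (config : List (String × String)) : Decidable (Pre_extract_account_info_py rows config) := by unfold Pre_extract_account_info_py; infer_instance

def pvWitness_extract_account_info_py : List (List (Option String)) × (List (String × String)) :=
  ([[some "name: Bob"]], [("account_name_key", "name:"), ("account_number_key", "no:")])

def Spec_extract_account_info_py (rows : List (List (Option String))) (config : List (String × String)) (out : Option String × Option String) : Prop := out = extract_account_info_py_alt rows config
instance (rows : List (List (Option String))) (config : List (String × String)) (out : Option String × Option String) : Decidable (Spec_extract_account_info_py rows config out) := by unfold Spec_extract_account_info_py; infer_instance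

-- ===== CLAIM (what is proved, stated in full; the proofs are below) =====
def Claim_equal_extract_account_info_py : Prop := ∀ (rows : List (List (Option String))) (config : List (String × String)), Dom_extract_account_info_py rows config → Pre_extract_account_info_py rows config → Spec_extract_account_info_py rows config (extract_account_info_py rows config)

-- ===== LEMMAS AND PROOFS =====

-- the value the key extracts from one cell, or none (identical semantics in A and B)
def pvHit (key v : String) : Option String :=
  if key ≠ "" ∧ PySem.Str.isIn key v = true then
    match PySem.List.pyGet? ((PySem.Str.split? v key).getD []) 1 with
    | some p => some (PySem.Str.strip p)
    | none => none
  else none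

lemma split?_eq_none_iff (v key : String) : PySem.Str.split? v key = none ↔ key = "" := by
  simp [PySem.Str.split?, PySem.Chars.split?, List.isEmpty_iff]

-- A's per-cell try/except block, component-wise
lemma a_cell_eq (key v : String) (cur : Option String) :
    (if PySem.Str.isIn key v = true then
      match PySem.Str.split? v key with
      | some parts =>
        match PySem.List.pyGet? parts 1 with
        | some p => some (PySem.Str.strip p)
        | none => cur
      | none => cur
    else cur) = (pvHit key v).or cur := by
  unfold pvHit
  by_cases hin : PySem.Str.isIn key v = true
  · rw [if_pos hin]
    by_cases hk : key = ""
    · subst hk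
      rw [(split?_eq_none_iff v "").mpr rfl]
      simp
    · obtain ⟨parts, hp⟩ : ∃ parts, PySem.Str.split? v key = some parts := by
        cases h : PySem.Str.split? v key with
        | none => exact absurd ((split?_eq_none_iff v key).mp h) hk
        | some parts => exact ⟨parts, rfl⟩
      rw [hp, if_pos ⟨hk, hin⟩]
      simp only [Option.getD_some]
      cases hq : PySem.List.pyGet? parts 1 <;> simp
  · rw [if_neg hin, if_neg (by tauto)]
    simp

-- B's per-cell guarded update, component-wise
lemma b_cell_eq (key v : String) (cur : Option String) :
    (if cur = none then
      (if key ≠ "" ∧ PySem.Str.isIn key v = true then pvGrab key v cur else cur)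
    else cur) = cur.or (pvHit key v) := by
  cases cur with
  | some x => simp
  | none =>
    rw [Option.none_or, if_pos rfl]
    by_cases hg : key ≠ "" ∧ PySem.Str.isIn key v = true
    · rw [if_pos hg]
      unfold pvGrab pvHit
      rw [if_pos hg]
    · rw [if_neg hg]
      unfold pvHit
      rw [if_neg hg]

-- canonical value of one component: later cells (in vs-order) win, fallback none
def pvLast (key : String) (vs : List (Option String)) : Option String :=
  vs.foldr (fun v a => a.or (pvHit key (v.getD ""))) none

lemma foldl_or_left (key : String) (vs : List (Option String)) (a0 : Option String) :
    vs.foldl (fun a v => (pvHit key (v.getD "")).or a) a0 = (pvLast key vs).or a0 := by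
  induction vs generalizing a0 with
  | nil => simp [pvLast]
  | cons v t ih =>
    simp only [List.foldl_cons, pvLast, List.foldr_cons] at *
    rw [ih, Option.or_assoc]

lemma foldl_or_right (key : String) (vs : List (Option String)) :
    vs.reverse.foldl (fun a v => a.or (pvHit key (v.getD ""))) none = pvLast key vs := by
  rw [List.foldl_reverse]; rfl

-- A's whole loop over the first-ten rows, flattened
lemma a_loop_eq (nk bk : String) (rs : List (List (Option String))) :
    rs.foldl
      (fun st row => row.foldl
        (fun st v => ((pvHit nk (v.getD "")).or st.1, (pvHit bk (v.getD "")).or st.2)) st)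
      ((none : Option String), (none : Option String))
    = (pvLast nk (rs.flatMap (fun r => r)), pvLast bk (rs.flatMap (fun r => r))) := by
  rw [← List.foldl_flatMap,
      PySem.List.foldl_prod_mk (fun a (v : Option String) => (pvHit nk (v.getD "")).or a)
        (fun a (v : Option String) => (pvHit bk (v.getD "")).or a) (rs.flatMap (fun r => r)) none none,
      foldl_or_left, foldl_or_left, Option.or_none, Option.or_none]

-- B's guarded inner scan (over one reversed row) is the Option.or fold
lemma scanVals_eq (config : List (String × String)) (st : Option String × Option String)
    (vals : List (Option String)) (nk bk : String)
    (hnk : nk = pvKeyLookup config "account_name_key")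
    (hbk : bk = pvKeyLookup config "account_number_key") :
    pvScanVals config st vals
      = vals.foldl (fun st v => (st.1.or (pvHit nk (v.getD "")), st.2.or (pvHit bk (v.getD "")))) st := by
  subst hnk hbk
  induction vals generalizing st with
  | nil => rfl
  | cons v t ih =>
    simp only [pvScanVals, List.foldl_cons]
    rw [b_cell_eq, b_cell_eq, ih]

-- a full state is a fixed point of the inner scan …
lemma scanVals_full (config : List (String × String)) (a b : String) (vals : List (Option String)) :
    pvScanVals config (some a, some b) vals = (some a, some b) := by
  rw [scanVals_eq config _ _ _ _ rfl rfl]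
  induction vals with
  | nil => rfl
  | cons v t ih => simpa using ih

-- … and of the outer loop, so the early 'break' cannot change the result
lemma scanRows_foldl_full (config : List (String × String)) (a b : String) (rs : List (List (Option String))) :
    rs.foldl (fun st row => pvScanVals config st row.reverse) (some a, some b) = (some a, some b) := by
  induction rs with
  | nil => rfl
  | cons r t ih => simp only [List.foldl_cons, scanVals_full]; exact ih

lemma scanRows_eq (config : List (String × String)) (st : Option String × Option String)
    (rs : List (List (Option String))) :
    pvScanRows config st rs = rs.foldl (fun st row => pvScanVals config st row.reverse) st := by
  induction rs generalizing st with
  | nil => rfl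
  | cons r t ih =>
    simp only [pvScanRows, List.foldl_cons]
    by_cases h : ((pvScanVals config st r.reverse).1.isSome = true ∧ (pvScanVals config st r.reverse).2.isSome = true)
    · rw [if_pos h]
      obtain ⟨a, ha⟩ := Option.isSome_iff_exists.mp h.1
      obtain ⟨b, hb⟩ := Option.isSome_iff_exists.mp h.2
      have hst : pvScanVals config st r.reverse = (some a, some b) := Prod.ext ha hb
      rw [hst, scanRows_foldl_full]
    · rw [if_neg h, ih]

-- B's whole backward scan over the first-ten rows, flattened
lemma b_loop_eq (config : List (String × String)) (rs : List (List (Option String)))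
    (nk bk : String)
    (hnk : nk = pvKeyLookup config "account_name_key")
    (hbk : bk = pvKeyLookup config "account_number_key") :
    pvScanRows config ((none : Option String), (none : Option String)) rs.reverse
      = (pvLast nk (rs.flatMap (fun r => r)), pvLast bk (rs.flatMap (fun r => r))) := by
  rw [scanRows_eq]
  have h1 : rs.reverse.foldl (fun st row => pvScanVals config st row.reverse) (none, none)
      = rs.reverse.foldl (fun st row => row.reverse.foldl
          (fun st v => (st.1.or (pvHit nk (v.getD "")), st.2.or (pvHit bk (v.getD "")))) st) (none, none) :=
    PySem.List.foldl_congr_mem _ _ _ _ (fun acc row _ => scanVals_eq config acc row.reverse nk bk hnk hbk)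
  have h2 : (rs.flatMap (fun r => r)).reverse = rs.reverse.flatMap (fun r => r.reverse) := by
    rw [List.reverse_flatMap]; rfl
  rw [h1, ← List.foldl_flatMap, ← h2,
      PySem.List.foldl_prod_mk (fun a (v : Option String) => a.or (pvHit nk (v.getD "")))
        (fun a (v : Option String) => a.or (pvHit bk (v.getD "")))
        (rs.flatMap (fun r => r)).reverse none none,
      foldl_or_right, foldl_or_right]

-- A's range-with-indexing loop is the fold over rows.take 10
lemma a_range_eq (f : (Option String × Option String) → List (Option String) → (Option String × Option String)) (rows : List (List (Option String))) :
    (PySem.List.pyRange 0 (min 10 (rows.length : Int)) 1).foldl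
      (fun st i => f st (PySem.List.pyGetD rows i [])) (none, none)
    = (rows.take 10).foldl f (none, none) := by
  have hb : min 10 (rows.length : Int) = ((rows.take 10).length : Int) := by
    rw [List.length_take]; push_cast; omega
  rw [hb]
  trans ((PySem.List.pyRange 0 ((rows.take 10).length : Int) 1).foldl
      (fun st i => f st (PySem.List.pyGetD (rows.take 10) i [])) (none, none))
  · apply PySem.List.foldl_congr_mem
    intro acc i hi
    have hmem := (PySem.List.mem_pyRange_one).mp hi
    have h0 : 0 ≤ i := hmem.1
    have hlen : ((rows.take 10).length : Int) ≤ (rows.length : Int) := by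
      have : (rows.take 10).length ≤ rows.length := by rw [List.length_take]; omega
      exact_mod_cast this
    rw [PySem.List.pyGetD_eq_getElem rows [] h0 (lt_of_lt_of_le hmem.2 hlen),
        PySem.List.pyGetD_eq_getElem (rows.take 10) [] h0 hmem.2]
    simp [List.getElem_take]
  · exact PySem.List.foldl_pyRange_zero_pyGetD' (rows.take 10) [] f (none, none)

-- ===== VERDICT (by name: the statement is the Claim_ definition above) =====
theorem extract_account_info_py_spec : Claim_equal_extract_account_info_py := by
  intro rows config _ _
  unfold Spec_extract_account_info_py extract_account_info_py extract_account_info_py_alt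
  rw [PySem.List.slice_to rows (by norm_num)]
  simp only [show ((10 : Int)).toNat = 10 from rfl]
  set nk := pvKeyLookup config "account_name_key" with hnk
  set bk := pvKeyLookup config "account_number_key" with hbk
  rw [b_loop_eq config (rows.take 10) nk bk hnk hbk]
  have hfun : (fun (st : Option String × Option String) (val : Option String) =>
      ((if PySem.Str.isIn nk (val.getD "") = true then
          match PySem.Str.split? (val.getD "") nk with
          | some parts =>
            match PySem.List.pyGet? parts 1 with
            | some p => some (PySem.Str.strip p)
            | none => st.1
          | none => st.1
        else st.1),
       (if PySem.Str.isIn bk (val.getD "") = true then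
          match PySem.Str.split? (val.getD "") bk with
          | some parts =>
            match PySem.List.pyGet? parts 1 with
            | some p => some (PySem.Str.strip p)
            | none => st.2
          | none => st.2
        else st.2)))
    = (fun st val => ((pvHit nk (val.getD "")).or st.1, (pvHit bk (val.getD "")).or st.2)) := by
    funext st val
    rw [a_cell_eq nk (val.getD "") st.1, a_cell_eq bk (val.getD "") st.2]
  rw [hfun, a_range_eq (fun st row => row.foldl
        (fun st v => ((pvHit nk (v.getD "")).or st.1, (pvHit bk (v.getD "")).or st.2)) st) rows]
  exact a_loop_eq nk bk (rows.take 10)
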